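-- pv_equiv track=rewrite | github.com/sdflksjf2683/MultimodalDialogue | make_album.py | process_relationship_text
-- ===== SOURCE A (Python) =====
-- def process_relationship_text(relationship_text):
--     lines = relationship_text.split('\n')
--     result = []
--     current_item = ""
--
--     for line in lines:
--         if line.startswith('-') or line.startswith('<'):
--             if current_item.strip():
--                 result.append(current_item.strip())
--             current_item = line
--         else:
--             current_item += f" {line}"
--
--     if current_item.strip():
--         result.append(current_item.strip())
--
--     return [item for item in result if '-' in item]
-- ===== SOURCE B (Python) =====
-- def process_relationship_text(relationship_text):
--     # Boundary-index decomposition: find the indices of marker lines, then cut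
--     # the line list into slices between consecutive boundaries, join/strip each,
--     # and keep the items containing '-'.
--     lines = relationship_text.split('\n')
--     bounds = [i for i, line in enumerate(lines) if line.startswith(('-', '<'))]
--     items = [' '.join(lines[s:e]).strip()
--              for s, e in zip([0] + bounds, bounds + [len(lines)])]
--     return [item for item in items if '-' in item]
-- ===== Notes on version B (the rewrite author's own statement) =====
-- stated objective: alternative
-- what changed: B replaces A's running string accumulator with a boundary-index decomposition: it first collects the indices of marker lines via enumerate, then cuts the line list into slices between consecutive boundaries and joins/strips/filters them in separate comprehensions.
import Mathlib
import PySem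

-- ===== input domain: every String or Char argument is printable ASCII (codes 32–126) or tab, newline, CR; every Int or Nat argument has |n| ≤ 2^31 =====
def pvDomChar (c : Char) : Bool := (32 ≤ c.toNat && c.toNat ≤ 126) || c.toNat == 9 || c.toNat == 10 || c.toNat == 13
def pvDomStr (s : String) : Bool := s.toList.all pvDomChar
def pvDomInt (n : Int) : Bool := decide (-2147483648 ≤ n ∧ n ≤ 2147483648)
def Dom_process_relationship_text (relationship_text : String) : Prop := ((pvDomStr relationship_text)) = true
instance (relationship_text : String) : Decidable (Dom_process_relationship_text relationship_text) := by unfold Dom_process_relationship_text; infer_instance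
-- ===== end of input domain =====

-- B replaces A's running string accumulator by a boundary-index decomposition:
-- collect the indices of marker lines, slice the line list between consecutive
-- boundaries, then join/strip/filter (objective: alternative; same cost).

-- ===== PORT A =====
-- A's loop body: state = (result, current_item), over List Char
def pvAStep (st : List (List Char) × List Char) (line : List Char) :
    List (List Char) × List Char :=
  if PySem.Chars.startswith line ['-'] || PySem.Chars.startswith line ['<'] then
    ((if PySem.Chars.strip st.2 ≠ [] then st.1 ++ [PySem.Chars.strip st.2] else st.1), line)
  else
    (st.1, st.2 ++ ' ' :: line)

def process_relationship_text (relationship_text : String) : List String :=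
  let lines := PySem.Chars.splitOn relationship_text.toList ['\n']
  let st := lines.foldl pvAStep ([], [])
  let result := if PySem.Chars.strip st.2 ≠ [] then st.1 ++ [PySem.Chars.strip st.2] else st.1
  (result.filter (fun item => PySem.Chars.isIn ['-'] item)).map String.ofList

-- ===== PORT B =====
-- line.startswith(('-', '<'))
def pvIsM (line : List Char) : Bool :=
  PySem.Chars.startswith line ['-'] || PySem.Chars.startswith line ['<']

-- ' '.join(g).strip()
def pvJoinStrip (g : List (List Char)) : List Char :=
  PySem.Chars.strip (PySem.Chars.join [' '] g)

def process_relationship_text_alt (relationship_text : String) : List String :=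
  let lines := PySem.Chars.splitOn relationship_text.toList ['\n']
  let bounds := ((PySem.List.enumerate lines).filter (fun p => pvIsM p.2)).map (fun p => p.1)
  let items := (((0 : Int) :: bounds).zip (bounds ++ [PySem.List.len lines])).map
      (fun p => pvJoinStrip (PySem.List.slice lines (some p.1) (some p.2)))
  (items.filter (fun item => PySem.Chars.isIn ['-'] item)).map String.ofList

-- ===== PRECONDITION & SPEC =====
def Spec_process_relationship_text (relationship_text : String) (out : List String) : Prop := out = process_relationship_text_alt relationship_text
instance (relationship_text : String) (out : List String) : Decidable (Spec_process_relationship_text relationship_text out) := by unfold Spec_process_relationship_text; infer_instance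

-- ===== CLAIM (what is proved, stated in full; the proofs are below) =====
def Claim_equal_process_relationship_text : Prop := ∀ (relationship_text : String), Dom_process_relationship_text relationship_text → Spec_process_relationship_text relationship_text (process_relationship_text relationship_text)

-- ===== LEMMAS AND PROOFS =====

-- B's grouping as structural recursion: groups of lines, cut before each marker line
def pvSegRec : List (List Char) → List (List (List Char))
  | [] => [[]]
  | l :: ls =>
    if pvIsM l then [] :: (pvSegRec ls).modifyHead (l :: ·)
    else (pvSegRec ls).modifyHead (l :: ·)

-- the grouping fold that mediates between A's accumulator and B's slices
def pvBStep (st : List (List (List Char)) × List (List Char)) (line : List Char) :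
    List (List (List Char)) × List (List Char) :=
  if pvIsM line then (st.1 ++ [st.2], [line]) else (st.1, st.2 ++ [line])

-- Nat-level boundary indices
def pvNB : List (List Char) → List Nat
  | [] => []
  | l :: ls => (if pvIsM l then [0] else []) ++ (pvNB ls).map (· + 1)

def pvSegsN (lines : List (List Char)) : List (List (List Char)) :=
  (((0 : Nat) :: pvNB lines).zip (pvNB lines ++ [lines.length])).map
    (fun p => (lines.drop p.1).take (p.2 - p.1))

-- ---- A's fold vs the grouping fold (relation on the accumulators) ----
def pvRel (ci : List Char) (cur : List (List Char)) : Prop :=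
  ci = PySem.Chars.join [' '] cur ∨ (cur ≠ [] ∧ ci = ' ' :: PySem.Chars.join [' '] cur)

lemma strip_cons_space (x : List Char) :
    PySem.Chars.strip (' ' :: x) = PySem.Chars.strip x := by
  have h : PySem.Chars.isspace ' ' = true := by decide
  simp [PySem.Chars.strip, PySem.Chars.lstrip, h]

lemma strip_of_rel {ci : List Char} {cur : List (List Char)} (h : pvRel ci cur) :
    PySem.Chars.strip ci = pvJoinStrip cur := by
  rcases h with h | ⟨_, h⟩ <;> simp [h, pvJoinStrip, strip_cons_space]

lemma join_nil : PySem.Chars.join [' '] ([] : List (List Char)) = [] := by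
  simp [PySem.Chars.join, List.intercalate, List.intersperse]

lemma join_singleton (a : List Char) : PySem.Chars.join [' '] [a] = a := by
  simp [PySem.Chars.join, List.intercalate, List.intersperse]

lemma join_cons2 (a b : List Char) (l : List (List Char)) :
    PySem.Chars.join [' '] (a :: b :: l) = a ++ ' ' :: PySem.Chars.join [' '] (b :: l) := by
  simp [PySem.Chars.join, List.intercalate, List.intersperse]

lemma join_append_singleton (cur : List (List Char)) (line : List Char) (h : cur ≠ []) :
    PySem.Chars.join [' '] (cur ++ [line])
      = PySem.Chars.join [' '] cur ++ ' ' :: line := by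
  induction cur with
  | nil => exact absurd rfl h
  | cons c cs ih =>
    cases cs with
    | nil => simp [join_cons2]
    | cons d ds =>
      simp only [List.cons_append, join_cons2]
      rw [← List.cons_append, ih (by simp)]; simp

lemma isIn_dash_nil : PySem.Chars.isIn ['-'] [] = false := by decide

-- closing A's accumulator agrees (after the '-' filter) with closing B's group list
lemma pvFilterClose (r : List (List Char)) (ci : List Char)
    (gs : List (List (List Char))) (cur : List (List Char))
    (hrel : pvRel ci cur)
    (hr : r.filter (fun item => PySem.Chars.isIn ['-'] item)
        = (gs.map pvJoinStrip).filter (fun item => PySem.Chars.isIn ['-'] item)) :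
    (if PySem.Chars.strip ci ≠ [] then r ++ [PySem.Chars.strip ci] else r).filter
        (fun item => PySem.Chars.isIn ['-'] item)
      = ((gs ++ [cur]).map pvJoinStrip).filter (fun item => PySem.Chars.isIn ['-'] item) := by
  have hs := strip_of_rel hrel
  by_cases h : PySem.Chars.strip ci = []
  · simp [h, List.filter_append, hr, ← hs, isIn_dash_nil]
  · simp [h, List.filter_append, hr, ← hs]

-- the invariant carried through the two folds
lemma main_loop (lines : List (List Char)) :
    ∀ (r : List (List Char)) (ci : List Char) (gs : List (List (List Char)))
      (cur : List (List Char)), pvRel ci cur →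
      r.filter (fun item => PySem.Chars.isIn ['-'] item)
        = (gs.map pvJoinStrip).filter (fun item => PySem.Chars.isIn ['-'] item) →
      (let st := lines.foldl pvAStep (r, ci)
       (if PySem.Chars.strip st.2 ≠ [] then st.1 ++ [PySem.Chars.strip st.2] else st.1).filter
          (fun item => PySem.Chars.isIn ['-'] item))
      = (let st := lines.foldl pvBStep (gs, cur)
         ((st.1 ++ [st.2]).map pvJoinStrip).filter (fun item => PySem.Chars.isIn ['-'] item)) := by
  induction lines with
  | nil =>
    intro r ci gs cur hrel hr
    simpa using pvFilterClose r ci gs cur hrel hr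
  | cons line rest ih =>
    intro r ci gs cur hrel hr
    by_cases hm : pvIsM line = true
    · simp only [List.foldl_cons, pvAStep, pvBStep, pvIsM] at hm ⊢
      simp only [hm, if_pos]
      exact ih _ line (gs ++ [cur]) [line]
        (Or.inl (join_singleton line).symm)
        (pvFilterClose r ci gs cur hrel hr)
    · simp only [List.foldl_cons, pvAStep, pvBStep, pvIsM] at hm ⊢
      simp only [Bool.not_eq_true] at hm
      simp only [hm, Bool.false_eq_true, if_false]
      refine ih r (ci ++ ' ' :: line) gs (cur ++ [line]) ?_ hr
      rcases hrel with h | ⟨hne, h⟩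
      · cases cur with
        | nil =>
          right
          refine ⟨by simp, ?_⟩
          simp [h]
        | cons c cs =>
          left
          rw [h, join_append_singleton _ _ (by simp)]
      · right
        refine ⟨by simp, ?_⟩
        rw [h, join_append_singleton _ _ hne]
        simp

-- ---- the grouping fold equals pvSegRec ----
lemma segRec_ne_nil (ls : List (List Char)) : pvSegRec ls ≠ [] := by
  induction ls with
  | nil => simp [pvSegRec]
  | cons l ls ih =>
    obtain ⟨x, xs, hx⟩ := List.exists_cons_of_ne_nil ih
    simp only [pvSegRec, hx]
    split <;> simp

lemma bfold_eq_segRec (ls : List (List Char)) :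
    ∀ (gs : List (List (List Char))) (cur : List (List Char)),
      (let st := ls.foldl pvBStep (gs, cur); st.1 ++ [st.2])
        = gs ++ (pvSegRec ls).modifyHead (cur ++ ·) := by
  induction ls with
  | nil => intro gs cur; simp [pvSegRec, List.modifyHead]
  | cons l ls ih =>
    intro gs cur
    by_cases hm : pvIsM l = true
    · simp only [List.foldl_cons, pvBStep, hm, if_pos, pvSegRec]
      rw [ih (gs ++ [cur]) [l]]
      obtain ⟨x, xs, hx⟩ := List.exists_cons_of_ne_nil (segRec_ne_nil ls)
      simp [hx]
    · simp only [List.foldl_cons, pvBStep, hm, Bool.false_eq_true, if_false, pvSegRec]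
      rw [ih gs (cur ++ [l])]
      congr 1
      obtain ⟨x, xs, hx⟩ := List.exists_cons_of_ne_nil (segRec_ne_nil ls)
      simp [hx]

-- ---- pvSegsN equals pvSegRec ----
lemma zipmap_shift (l : List Char) (ls : List (List Char)) :
    ∀ (xs ys : List Nat),
      ((xs.map (· + 1)).zip (ys.map (· + 1))).map
          (fun p => ((l :: ls).drop p.1).take (p.2 - p.1))
        = (xs.zip ys).map (fun p => (ls.drop p.1).take (p.2 - p.1)) := by
  intro xs
  induction xs with
  | nil => intro ys; simp
  | cons x xs ih =>
    intro ys
    cases ys with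
    | nil => simp
    | cons y ys => simp [ih ys, Nat.succ_sub_succ]

lemma segsN_cons_shift (l : List Char) (ls : List (List Char)) (xs ys : List Nat) :
    (((0 : Nat) :: xs.map (· + 1)).zip (ys.map (· + 1))).map
        (fun p => ((l :: ls).drop p.1).take (p.2 - p.1))
      = ((((0 : Nat) :: xs).zip ys).map
          (fun p => (ls.drop p.1).take (p.2 - p.1))).modifyHead (l :: ·) := by
  cases ys with
  | nil => simp
  | cons y ys =>
    simp only [List.map_cons, List.zip_cons_cons, List.map, zipmap_shift l ls xs ys,
      List.modifyHead]
    simp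

lemma segsN_eq_segRec (ls : List (List Char)) : pvSegsN ls = pvSegRec ls := by
  induction ls with
  | nil => rfl
  | cons l ls ih =>
    have h1 : (pvNB ls).map (· + 1) ++ [ls.length + 1]
        = (pvNB ls ++ [ls.length]).map (· + 1) := by simp
    by_cases hm : pvIsM l = true
    · simp only [pvSegsN, pvNB, hm, if_pos, List.length_cons,
        List.nil_append, List.cons_append, List.zip_cons_cons, List.map_cons, h1]
      rw [segsN_cons_shift l ls (pvNB ls) (pvNB ls ++ [ls.length]), ← pvSegsN, ih]
      rw [pvSegRec]
      simp [hm]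
    · simp only [pvSegsN, pvNB, hm, Bool.false_eq_true, if_false, List.length_cons,
        List.nil_append, h1]
      rw [segsN_cons_shift l ls (pvNB ls) (pvNB ls ++ [ls.length]), ← pvSegsN, ih]
      rw [pvSegRec]
      simp [hm]

-- ---- B's Int-level bounds are the cast of pvNB ----
lemma enum_filter_eq_nb (ls : List (List Char)) :
    ∀ (s : Nat),
      (((PySem.List.enumerate ls (s : Int)).filter (fun p => pvIsM p.2)).map (fun p => p.1))
        = (pvNB ls).map (fun k => ((k + s : Nat) : Int)) := by
  induction ls with
  | nil => intro s; simp [PySem.List.enumerate_nil, pvNB]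
  | cons l ls ih =>
    intro s
    have hcast : ((s : Int) + 1) = ((s + 1 : Nat) : Int) := by push_cast; ring
    rw [PySem.List.enumerate_cons, hcast, List.filter_cons]
    by_cases hm : pvIsM l = true
    · simp only [hm, if_pos, List.map_cons, ih (s + 1), pvNB, List.singleton_append]
      rw [List.map_map]
      congr 1
      · simp
      · apply List.map_congr_left
        intro k _
        simp only [Function.comp_apply]
        push_cast
        ring
    · simp only [hm, Bool.false_eq_true, if_false, ih (s + 1), pvNB, List.nil_append]
      rw [List.map_map]
      apply List.map_congr_left
      intro k _
      simp only [Function.comp_apply]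
      push_cast
      ring

-- slice with Nat-cast bounds is drop/take
lemma slice_cast (lines : List (List Char)) (a b : Nat) :
    PySem.List.slice lines (some ((a : Nat) : Int)) (some ((b : Nat) : Int))
      = (lines.drop a).take (b - a) :=
  PySem.List.slice_natCast lines a b

-- B's items list equals pvSegsN mapped through join/strip
lemma alt_items_eq (lines : List (List Char)) :
    ((((0 : Int) :: ((PySem.List.enumerate lines).filter (fun p => pvIsM p.2)).map (fun p => p.1)).zip
        (((PySem.List.enumerate lines).filter (fun p => pvIsM p.2)).map (fun p => p.1)
          ++ [PySem.List.len lines])).map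
      (fun p => pvJoinStrip (PySem.List.slice lines (some p.1) (some p.2))))
    = (pvSegsN lines).map pvJoinStrip := by
  have hb : (((PySem.List.enumerate lines).filter (fun p => pvIsM p.2)).map (fun p => p.1))
      = (pvNB lines).map (fun k => ((k : Nat) : Int)) := by
    have := enum_filter_eq_nb lines 0
    simpa using this
  have hlen : PySem.List.len lines = ((lines.length : Nat) : Int) := by
    simp [PySem.List.len_eq]
  have hz : ((0 : Int) :: (pvNB lines).map (fun k => ((k : Nat) : Int))).zip
        ((pvNB lines).map (fun k => ((k : Nat) : Int)) ++ [((lines.length : Nat) : Int)])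
      = ((((0 : Nat) :: pvNB lines).zip (pvNB lines ++ [lines.length])).map
          (fun p => (((p.1 : Nat) : Int), ((p.2 : Nat) : Int)))) := by
    have : ((0 : Int) :: (pvNB lines).map (fun k => ((k : Nat) : Int)))
        = (((0 : Nat) :: pvNB lines).map (fun k => ((k : Nat) : Int))) := by simp
    rw [this]
    have : ((pvNB lines).map (fun k => ((k : Nat) : Int)) ++ [((lines.length : Nat) : Int)])
        = ((pvNB lines ++ [lines.length]).map (fun k => ((k : Nat) : Int))) := by simp
    rw [this, List.zip_map]
    rfl
  rw [hb, hlen, hz, pvSegsN, List.map_map, List.map_map]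
  apply List.map_congr_left
  intro p _
  simp [Function.comp, slice_cast]

-- ===== VERDICT (by name: the statement is the Claim_ definition above) =====
theorem process_relationship_text_spec : Claim_equal_process_relationship_text := by
  intro s _
  unfold Spec_process_relationship_text process_relationship_text process_relationship_text_alt
  dsimp only
  rw [alt_items_eq, segsN_eq_segRec]
  have hA :
      (if PySem.Chars.strip ((PySem.Chars.splitOn s.toList ['\n']).foldl pvAStep ([], [])).2 ≠ []
        then ((PySem.Chars.splitOn s.toList ['\n']).foldl pvAStep ([], [])).1
          ++ [PySem.Chars.strip ((PySem.Chars.splitOn s.toList ['\n']).foldl pvAStep ([], [])).2]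
        else ((PySem.Chars.splitOn s.toList ['\n']).foldl pvAStep ([], [])).1).filter
          (fun item => PySem.Chars.isIn ['-'] item)
      = ((((PySem.Chars.splitOn s.toList ['\n']).foldl pvBStep ([], [])).1
          ++ [((PySem.Chars.splitOn s.toList ['\n']).foldl pvBStep ([], [])).2]).map
            pvJoinStrip).filter (fun item => PySem.Chars.isIn ['-'] item) :=
    main_loop (PySem.Chars.splitOn s.toList ['\n']) [] [] [] [] (Or.inl join_nil.symm) rfl
  have hB :
      ((PySem.Chars.splitOn s.toList ['\n']).foldl pvBStep ([], [])).1
          ++ [((PySem.Chars.splitOn s.toList ['\n']).foldl pvBStep ([], [])).2]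
        = [] ++ (pvSegRec (PySem.Chars.splitOn s.toList ['\n'])).modifyHead ([] ++ ·) :=
    bfold_eq_segRec (PySem.Chars.splitOn s.toList ['\n']) [] []
  rw [List.filter_map] at hA ⊢
  rw [hA, hB]
  congr 2
  simp only [List.nil_append]
  obtain ⟨x, xs, hx⟩ := List.exists_cons_of_ne_nil
    (segRec_ne_nil (PySem.Chars.splitOn s.toList ['\n']))
  simp [hx, List.modifyHead]
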